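-- pv_equiv track=rewrite | github.com/Atheros21/python_homework | Lab2/l2.py | findExits
-- ===== SOURCE A (Python) =====
-- def findExits(myArray):
--     retVal = []
--     for i in range(len(myArray)):
--         for j in range(len(myArray[i])):
--            if i == 0 or j==0 or i==len(myArray)-1 or j == len(myArray)-1:
--                if(myArray[i][j]==0):
--                    retVal.append([i,j])
--     return retVal
-- ===== SOURCE B (Python) =====
-- def findExits(myArray):
--     # Only visits perimeter cells (border columns 0 and len(myArray)-1, matching A's index convention)
--     n = len(myArray)
--     out = []
--     for i, row in enumerate(myArray):
--         if i == 0 or i == n - 1: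
--             for j, v in enumerate(row):
--                 if v == 0:
--                     out.append([i, j])
--         else:
--             for j in (0, n - 1):
--                 if j < len(row) and row[j] == 0:
--                     out.append([i, j])
--     return out
-- ===== Notes on version B (the rewrite author's own statement) =====
-- stated objective: faster
-- what changed: B visits only the perimeter cells (whole first/last row, and just columns 0 and len(myArray)-1 of each middle row, keeping A's column convention) instead of scanning every cell of every row and testing the border condition.
import Mathlib
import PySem

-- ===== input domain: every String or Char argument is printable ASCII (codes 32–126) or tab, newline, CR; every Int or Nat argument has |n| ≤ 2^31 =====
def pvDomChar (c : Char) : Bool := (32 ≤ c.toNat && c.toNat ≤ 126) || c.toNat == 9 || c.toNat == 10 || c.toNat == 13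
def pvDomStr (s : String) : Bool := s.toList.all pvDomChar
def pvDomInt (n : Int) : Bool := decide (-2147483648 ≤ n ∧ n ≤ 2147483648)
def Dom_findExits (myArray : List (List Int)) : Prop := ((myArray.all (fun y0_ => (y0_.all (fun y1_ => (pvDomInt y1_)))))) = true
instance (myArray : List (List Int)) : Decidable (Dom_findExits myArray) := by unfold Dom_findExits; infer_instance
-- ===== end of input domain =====

-- B visits only the perimeter cells (first/last row whole, middle rows only columns 0 and len-1,
-- keeping A's column convention len(myArray)-1) instead of scanning the full grid: O(n+m) vs O(n*m).


-- ===== PORT A =====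
def findExits (myArray : List (List Int)) : List (List Int) :=
  (PySem.List.pyRange 0 (myArray.length : Int)).foldl (fun retVal i =>
    (PySem.List.pyRange 0 (PySem.List.len ((PySem.List.pyGet? myArray i).getD []))).foldl
      (fun retVal j =>
        if i = 0 ∨ j = 0 ∨ i = (myArray.length : Int) - 1 ∨ j = (myArray.length : Int) - 1 then
          if PySem.List.pyGet? ((PySem.List.pyGet? myArray i).getD []) j = some 0 then
            retVal ++ [[i, j]]
          else retVal
        else retVal)
      retVal) []

-- ===== PORT B =====
def findExits_alt (myArray : List (List Int)) : List (List Int) :=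
  let n : Int := myArray.length
  (PySem.List.enumerate myArray).foldl (fun out p =>
    if p.1 = 0 ∨ p.1 = n - 1 then
      (PySem.List.enumerate p.2).foldl (fun out q =>
        if q.2 = 0 then out ++ [[p.1, q.1]] else out) out
    else
      ([0, n - 1] : List Int).foldl (fun out j =>
        if j < (p.2.length : Int) ∧ PySem.List.pyGet? p.2 j = some 0 then out ++ [[p.1, j]]
        else out) out) []

-- ===== PRECONDITION & SPEC =====
def Spec_findExits (myArray : List (List Int)) (out : List (List Int)) : Prop := out = findExits_alt myArray
instance (myArray : List (List Int)) (out : List (List Int)) : Decidable (Spec_findExits myArray out) := by unfold Spec_findExits; infer_instance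

-- ===== CLAIM (what is proved, stated in full; the proofs are below) =====
def Claim_equal_findExits : Prop := ∀ (myArray : List (List Int)), Dom_findExits myArray → Spec_findExits myArray (findExits myArray)

-- ===== LEMMAS AND PROOFS =====

-- A's contribution of row i (filter over the full column range, border condition tested per cell).
def pvRowA (xs : List (List Int)) (i : Int) : List (List Int) :=
  ((PySem.List.pyRange 0 (PySem.List.len ((PySem.List.pyGet? xs i).getD []))).filter
    (fun j => decide (i = 0 ∨ j = 0 ∨ i = (xs.length : Int) - 1 ∨ j = (xs.length : Int) - 1)
      && decide (PySem.List.pyGet? ((PySem.List.pyGet? xs i).getD []) j = some 0))).map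
    (fun j => [i, j])

-- B's contribution of an enumerated row.
def pvRowB (xs : List (List Int)) (p : Int × List Int) : List (List Int) :=
  if p.1 = 0 ∨ p.1 = (xs.length : Int) - 1 then
    ((PySem.List.enumerate p.2).filter (fun q => decide (q.2 = 0))).map (fun q => [p.1, q.1])
  else
    (([0, (xs.length : Int) - 1] : List Int).filter
      (fun j => decide (j < (p.2.length : Int) ∧ PySem.List.pyGet? p.2 j = some 0))).map
      (fun j => [p.1, j])

lemma pvA_flatMap (xs : List (List Int)) :
    findExits xs = (PySem.List.pyRange 0 (xs.length : Int)).flatMap (pvRowA xs) := by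
  unfold findExits
  rw [PySem.List.foldl_congr_mem _ _ (fun acc i => acc ++ pvRowA xs i)]
  · exact PySem.List.foldl_append_eq_flatMap _ _ _
  · intro acc i _
    rw [PySem.List.foldl_congr_mem _ _
        (fun acc j => if (decide (i = 0 ∨ j = 0 ∨ i = (xs.length : Int) - 1 ∨ j = (xs.length : Int) - 1)
            && decide (PySem.List.pyGet? ((PySem.List.pyGet? xs i).getD []) j = some 0)) = true
          then acc ++ [[i, j]] else acc)]
    · exact PySem.List.foldl_append_if _ _ _ _
    · intro acc' j _
      by_cases h1 : i = 0 ∨ j = 0 ∨ i = (xs.length : Int) - 1 ∨ j = (xs.length : Int) - 1 <;>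
        by_cases h2 : PySem.List.pyGet? ((PySem.List.pyGet? xs i).getD []) j = some 0 <;>
        simp [h1, h2]

lemma pvB_flatMap (xs : List (List Int)) :
    findExits_alt xs = (PySem.List.enumerate xs).flatMap (pvRowB xs) := by
  unfold findExits_alt
  rw [PySem.List.foldl_congr_mem _ _ (fun out p => out ++ pvRowB xs p)]
  · exact PySem.List.foldl_append_eq_flatMap _ _ _
  · intro out p _
    unfold pvRowB
    by_cases hp : p.1 = 0 ∨ p.1 = (xs.length : Int) - 1
    · simp only [hp, if_true]
      rw [PySem.List.foldl_congr_mem _ _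
          (fun out q => if (decide (q.2 = 0)) = true then out ++ [[p.1, q.1]] else out)]
      · exact PySem.List.foldl_append_if _ _ _ _
      · intro acc q _; by_cases h : q.2 = 0 <;> simp [h]
    · simp only [hp, if_false]
      rw [PySem.List.foldl_congr_mem _ _
          (fun out j => if (decide (j < (p.2.length : Int) ∧ PySem.List.pyGet? p.2 j = some 0)) = true
            then out ++ [[p.1, j]] else out)]
      · exact PySem.List.foldl_append_if _ _ _ _
      · intro acc j _; by_cases h : j < (p.2.length : Int) ∧ PySem.List.pyGet? p.2 j = some 0 <;> simp [h]

-- range/two-element-list filter exchange for the middle rows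
lemma pvFilt (L m : Nat) (hm : 0 < m) (q : Nat → Bool) :
    (List.range L).filter (fun k => decide (k = 0 ∨ k = m) && q k)
      = ([0, m] : List Nat).filter (fun k => decide (k < L) && q k) := by
  induction L with
  | zero => simp
  | succ L ih =>
    rw [List.range_succ, List.filter_append, ih]
    clear ih
    simp only [List.filter_cons, List.filter_nil]
    by_cases h0 : L = 0 <;> by_cases hLm : L = m <;>
      split_ifs <;> simp_all <;> omega

lemma pvRow_eq (xs : List (List Int)) (i : Int) (h0 : 0 ≤ i) (h1 : i < (xs.length : Int)) :
    pvRowA xs i = pvRowB xs (i, PySem.List.pyGetD xs i []) := by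
  obtain ⟨k, rfl⟩ : ∃ k : Nat, i = (k : Int) := ⟨i.toNat, (Int.toNat_of_nonneg h0).symm⟩
  have hk : k < xs.length := by exact_mod_cast h1
  have hget : PySem.List.pyGet? xs (k : Int) = some xs[k] := by
    rw [PySem.List.pyGet?_natCast]; exact List.getElem?_eq_getElem hk
  have hgetD : PySem.List.pyGetD xs (k : Int) [] = xs[k] :=
    PySem.List.pyGetD_eq_getElem xs [] h0 h1
  unfold pvRowA pvRowB
  simp only [hget, hgetD, Option.getD_some]
  have hlen : PySem.List.len xs[k] = ((xs[k] : List Int).length : Int) := by simp [PySem.List.len]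
  by_cases hedge : (k : Int) = 0 ∨ (k : Int) = (xs.length : Int) - 1
  · -- edge row: A's border test is true for every j; compare against B's enumerate filter
    simp only [hedge, if_true]
    rw [hlen, PySem.List.enumerate_eq_map_pyRange xs[k] 0, List.filter_map, List.map_map]
    have hpred : ∀ j ∈ PySem.List.pyRange 0 ((xs[k] : List Int).length : Int),
        (decide ((k : Int) = 0 ∨ j = 0 ∨ (k : Int) = (xs.length : Int) - 1
            ∨ j = (xs.length : Int) - 1)
          && decide (PySem.List.pyGet? xs[k] j = some 0))
        = ((fun q : Int × Int => decide (q.2 = 0)) ∘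
            (fun j => (j, PySem.List.pyGetD xs[k] j 0))) j := by
      intro j hj
      rw [PySem.List.mem_pyRange_one] at hj
      obtain ⟨l, rfl⟩ : ∃ l : Nat, j = (l : Int) := ⟨j.toNat, (Int.toNat_of_nonneg hj.1).symm⟩
      have hl : l < (xs[k] : List Int).length := by exact_mod_cast hj.2
      have hb : ((k : Int) = 0 ∨ (l : Int) = 0 ∨ (k : Int) = (xs.length : Int) - 1
          ∨ (l : Int) = (xs.length : Int) - 1) := by tauto
      have hsome : PySem.List.pyGet? xs[k] (l : Int) = some (xs[k] : List Int)[l] := by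
        rw [PySem.List.pyGet?_natCast]; exact List.getElem?_eq_getElem hl
      have hgd : PySem.List.pyGetD xs[k] (l : Int) 0 = (xs[k] : List Int)[l] :=
        PySem.List.pyGetD_eq_getElem xs[k] 0 (by positivity) hj.2
      simp only [Function.comp_apply, decide_eq_true hb, Bool.true_and, hsome, hgd]
      simp
    rw [List.filter_congr hpred]
    apply List.map_congr_left
    intro j _
    simp
  · -- middle row: k ≠ 0 and k ≠ n-1, so n ≥ 3 and A's border test reduces to j ∈ {0, n-1}
    simp only [hedge, if_false]
    rw [not_or] at hedge
    have hn3 : 3 ≤ xs.length := by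
      have h1 := hedge.1; have h2 := hedge.2; omega
    have hmcast : ((xs.length : Int) - 1) = ((xs.length - 1 : Nat) : Int) := by omega
    have hmpos : 0 < xs.length - 1 := by omega
    rw [hlen, PySem.List.pyRange_zero_natCast, List.filter_map, List.map_map]
    have hL : ∀ l ∈ List.range (xs[k] : List Int).length,
        ((fun j => decide ((k : Int) = 0 ∨ j = 0 ∨ (k : Int) = (xs.length : Int) - 1
            ∨ j = (xs.length : Int) - 1) && decide (PySem.List.pyGet? xs[k] j = some 0)) ∘
          (fun l : Nat => (l : Int))) l
        = (fun l => decide (l = 0 ∨ l = xs.length - 1)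
            && decide ((xs[k] : List Int)[l]? = some 0)) l := by
      intro l hl
      simp only [Function.comp_apply, PySem.List.pyGet?_natCast]
      have h1 : ((k : Int) = 0 ∨ (l : Int) = 0 ∨ (k : Int) = (xs.length : Int) - 1
          ∨ (l : Int) = (xs.length : Int) - 1) ↔ (l = 0 ∨ l = xs.length - 1) := by
        have e1 := hedge.1; have e2 := hedge.2
        constructor
        · rintro (h | h | h | h) <;> omega
        · rintro (h | h) <;> omega
      simp only [h1]
    rw [List.filter_congr hL,
      pvFilt (xs[k] : List Int).length (xs.length - 1) hmpos
        (fun l => decide ((xs[k] : List Int)[l]? = some 0))]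
    have hlist : ([0, (xs.length : Int) - 1] : List Int)
        = List.map (fun l : Nat => (l : Int)) ([0, xs.length - 1] : List Nat) := by
      rw [hmcast]; rfl
    rw [hlist, List.filter_map, List.map_map]
    have hpred : ∀ l ∈ ([0, xs.length - 1] : List Nat),
        (decide (l < (xs[k] : List Int).length)
          && decide ((xs[k] : List Int)[l]? = some 0))
        = ((fun j => decide (j < ((xs[k] : List Int).length : Int)
            ∧ PySem.List.pyGet? xs[k] j = some 0)) ∘ (fun l : Nat => (l : Int))) l := by
      intro l _
      simp only [Function.comp_apply, PySem.List.pyGet?_natCast, Bool.decide_and]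
      by_cases hc : l < (xs[k] : List Int).length
      · simp [hc]
      · simp [hc]
    rw [List.filter_congr hpred]

-- ===== VERDICT (by name: the statement is the Claim_ definition above) =====
theorem findExits_spec : Claim_equal_findExits := by
  intro xs _
  unfold Spec_findExits
  rw [pvA_flatMap, pvB_flatMap, PySem.List.enumerate_eq_map_pyRange xs [], List.flatMap_map]
  have hlen : PySem.List.len xs = (xs.length : Int) := by simp [PySem.List.len]
  rw [hlen]
  apply List.flatMap_congr
  intro i hi
  rw [PySem.List.mem_pyRange_one] at hi
  exact pvRow_eq xs i hi.1 hi.2
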